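-- pv_equiv track=rewrite | github.com/s2e-lab/Code-Smell-Code-Generation | Validation/BanditSamples/B101_train_py_files_2684_4.py | ordering_beers
-- ===== SOURCE A (Python) =====
-- def ordering_beers(beers):
--     assert 0 <= beers < 100
--
--     units = ["", "jeden", "dwa", "trzy", "cztery", "piec", "szesc" , "siedem", "osiem", "dziewiec",
--             "dziesiec", "jedenascie", "dwanascie", "trzynascie", "czternascie", "pietnascie", "szesnascie", "siedemnascie", "osiemnascie", "dziewietnascie"]
--     tens  = ["dwadziescia", "trzydziesci", "czterdziesci", "piecdziesiat", "szescdziesiat", "siedemdziesiat", "osiemdziesiat", "dziewiecdziesiat"]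
--
--     order = ["Woda mineralna", "Jedno piwo"]
--
--     for i, num in enumerate(units[2:], 2):
--         order.append("%s piw%s" % (num, "a" if i in [2, 3, 4] else ""))
--
--     for n in tens:
--         for i in range(10):
--             order.append("%s%s%s piw%s" % (n, " " * bool(i), units[i], "a" if i in [2, 3, 4] else ""))
--
--     return order[beers].capitalize() + " poprosze"
-- ===== SOURCE B (Python) =====
-- def ordering_beers(beers):
--     assert 0 <= beers < 100
--     units = ["", "jeden", "dwa", "trzy", "cztery", "piec", "szesc", "siedem", "osiem", "dziewiec",
--              "dziesiec", "jedenascie", "dwanascie", "trzynascie", "czternascie", "pietnascie",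
--              "szesnascie", "siedemnascie", "osiemnascie", "dziewietnascie"]
--     tens = ["dwadziescia", "trzydziesci", "czterdziesci", "piecdziesiat", "szescdziesiat",
--             "siedemdziesiat", "osiemdziesiat", "dziewiecdziesiat"]
--     if beers == 0:
--         phrase = "Woda mineralna"
--     elif beers == 1:
--         phrase = "Jedno piwo"
--     elif beers < 20:
--         phrase = units[beers] + " piw" + ("a" if beers in (2, 3, 4) else "")
--     else:
--         d = beers % 10
--         phrase = tens[beers // 10 - 2] + (" " + units[d] if d else "") + " piw" + ("a" if d in (2, 3, 4) else "")
--     return phrase.capitalize() + " poprosze"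
-- ===== Notes on version B (the rewrite author's own statement) =====
-- stated objective: simpler
-- what changed: B computes only the single requested phrase by direct case analysis (water, one beer, teens via the units table, larger counts via divmod into the tens and units tables) instead of building the full list of all phrases and indexing into it.
import Mathlib
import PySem

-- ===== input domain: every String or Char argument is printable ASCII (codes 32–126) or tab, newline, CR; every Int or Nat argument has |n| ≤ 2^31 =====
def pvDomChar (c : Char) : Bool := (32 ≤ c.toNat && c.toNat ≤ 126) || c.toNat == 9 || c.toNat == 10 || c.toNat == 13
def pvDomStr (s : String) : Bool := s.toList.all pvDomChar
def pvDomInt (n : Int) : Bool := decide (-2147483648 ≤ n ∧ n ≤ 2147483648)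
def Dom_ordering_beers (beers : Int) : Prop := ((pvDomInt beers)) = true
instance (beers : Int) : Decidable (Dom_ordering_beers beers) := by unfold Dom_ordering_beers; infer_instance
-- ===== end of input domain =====

-- B computes just the one requested phrase by direct case analysis instead of building all 100 phrases (objective: simpler).

-- shared data tables (the same literals both Pythons contain)
def pvUnits : List String :=
  ["", "jeden", "dwa", "trzy", "cztery", "piec", "szesc", "siedem", "osiem", "dziewiec",
   "dziesiec", "jedenascie", "dwanascie", "trzynascie", "czternascie", "pietnascie",
   "szesnascie", "siedemnascie", "osiemnascie", "dziewietnascie"]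

def pvTens : List String :=
  ["dwadziescia", "trzydziesci", "czterdziesci", "piecdziesiat", "szescdziesiat",
   "siedemdziesiat", "osiemdziesiat", "dziewiecdziesiat"]

-- str.capitalize(): first char uppercased, rest lowercased (exact on ASCII)
def pvCapitalize (s : String) : String :=
  match s.toList with
  | [] => ""
  | c :: rest => String.ofList (PySem.Chars.upperChar c :: PySem.Chars.lower rest)

-- ===== PORT A =====
def ordering_beers (beers : Int) : String :=
  -- assert 0 <= beers < 100 : excluded by Pre_
  -- for i, num in enumerate(units[2:], 2): ported as a fold carrying the counter i
  let order0 : List String := ["Woda mineralna", "Jedno piwo"]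
  let step1 : List String × Int :=
    (PySem.List.slice pvUnits (some 2) none).foldl
      (fun (st : List String × Int) num =>
        (st.1 ++ [num ++ " piw" ++ (if st.2 = 2 ∨ st.2 = 3 ∨ st.2 = 4 then "a" else "")], st.2 + 1))
      (order0, 2)
  let order : List String :=
    pvTens.foldl
      (fun ord n =>
        (PySem.List.pyRange 0 10 1).foldl
          (fun ord i =>
            ord ++ [n ++ (if i ≠ 0 then " " else "") ++ (PySem.List.pyGet? pvUnits i).getD ""
                      ++ " piw" ++ (if i = 2 ∨ i = 3 ∨ i = 4 then "a" else "")])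
          ord)
      step1.1
  pvCapitalize ((PySem.List.pyGet? order beers).getD "") ++ " poprosze"

-- ===== PORT B =====
def ordering_beers_alt (beers : Int) : String :=
  let phrase : String :=
    if beers = 0 then "Woda mineralna"
    else if beers = 1 then "Jedno piwo"
    else if beers < 20 then
      (PySem.List.pyGet? pvUnits beers).getD "" ++ " piw" ++
        (if beers = 2 ∨ beers = 3 ∨ beers = 4 then "a" else "")
    else
      let d := PySem.Int.mod beers 10
      (PySem.List.pyGet? pvTens (PySem.Int.floordiv beers 10 - 2)).getD "" ++
        (if d ≠ 0 then " " ++ (PySem.List.pyGet? pvUnits d).getD "" else "") ++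
        " piw" ++ (if d = 2 ∨ d = 3 ∨ d = 4 then "a" else "")
  pvCapitalize phrase ++ " poprosze"

-- ===== PRECONDITION & SPEC =====
-- A's leading assert raises AssertionError unless 0 <= beers < 100
def Pre_ordering_beers (beers : Int) : Prop := 0 ≤ beers ∧ beers < 100
instance (beers : Int) : Decidable (Pre_ordering_beers beers) := by unfold Pre_ordering_beers; infer_instance
def pvWitness_ordering_beers : Int := (37)

def Spec_ordering_beers (beers : Int) (out : String) : Prop := out = ordering_beers_alt beers
instance (beers : Int) (out : String) : Decidable (Spec_ordering_beers beers out) := by unfold Spec_ordering_beers; infer_instance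

-- ===== CLAIM (what is proved, stated in full; the proofs are below) =====
def Claim_equal_ordering_beers : Prop := ∀ (beers : Int), Dom_ordering_beers beers → Pre_ordering_beers beers → Spec_ordering_beers beers (ordering_beers beers)

-- ===== LEMMAS AND PROOFS =====
-- the finite check over all 100 admitted inputs
set_option maxRecDepth 10000 in
set_option maxHeartbeats 4000000 in
lemma ordering_beers_all : ∀ n : Fin 100, ordering_beers (n : Int) = ordering_beers_alt (n : Int) := by
  decide

-- ===== VERDICT (by name: the statement is the Claim_ definition above) =====
theorem ordering_beers_spec : Claim_equal_ordering_beers := by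
  intro beers _ hpre
  obtain ⟨h0, h100⟩ := hpre
  have hn : beers = ((beers.toNat : Nat) : Int) := (Int.toNat_of_nonneg h0).symm
  have hlt : beers.toNat < 100 := by omega
  have := ordering_beers_all ⟨beers.toNat, hlt⟩
  unfold Spec_ordering_beers
  rw [hn]
  exact this
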